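-- pv_equiv track=rewrite | github.com/apy-h/verdad_rbp_comps | main.py | create_column_mapping
-- ===== SOURCE A (Python) =====
-- from typing import List, Optional
--
-- def clean_column_name(col_name: str) -> str:
--     """Remove prefixes from column names for display purposes"""
--     prefixes_to_remove = ['IQ_', 'D_VALUE_BBG_', 'D_APY_']
--
--     for prefix in prefixes_to_remove:
--         if col_name.startswith(prefix):
--             return col_name[len(prefix):]
--
--     return col_name
--
-- def create_column_mapping(columns: List[str]) -> dict:
--     """Create a mapping from original column names to cleaned display names, handling duplicates"""
--     mapping = {}
--     cleaned_names_count = {}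
--
--     for col in columns:
--         cleaned = clean_column_name(col)
--
--         # Check if this cleaned name already exists
--         if cleaned in cleaned_names_count:
--             cleaned_names_count[cleaned] += 1
--             # Add a suffix to make it unique
--             mapping[col] = f"{cleaned}_{cleaned_names_count[cleaned]}"
--         else:
--             cleaned_names_count[cleaned] = 1
--             mapping[col] = cleaned
--
--     return mapping
-- ===== SOURCE B (Python) =====
-- def clean_column_name(col_name: str) -> str:
--     """Remove prefixes from column names for display purposes"""
--     prefixes_to_remove = ['IQ_', 'D_VALUE_BBG_', 'D_APY_']
--
--     for prefix in prefixes_to_remove: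
--         if col_name.startswith(prefix):
--             return col_name[len(prefix):]
--
--     return col_name
--
-- def create_column_mapping(columns):
--     """Index-then-assign: group columns by cleaned name, number each group, then emit in original order"""
--     groups = {}
--     for col in columns:
--         groups.setdefault(clean_column_name(col), []).append(col)
--
--     value = {}
--     for cleaned, cols in groups.items():
--         for i, col in enumerate(cols, start=1):
--             value[col] = cleaned if i == 1 else f"{cleaned}_{i}"
--
--     return {col: value[col] for col in columns}
-- ===== Notes on version B (the rewrite author's own statement) =====
-- stated objective: alternative
-- what changed: Replaces the interleaved count-and-emit loop (two running dicts updated per element) with an index-then-assign structure: group columns by cleaned name once, number each group's members 1,2,..., then emit the mapping in original column order.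
import Mathlib
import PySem

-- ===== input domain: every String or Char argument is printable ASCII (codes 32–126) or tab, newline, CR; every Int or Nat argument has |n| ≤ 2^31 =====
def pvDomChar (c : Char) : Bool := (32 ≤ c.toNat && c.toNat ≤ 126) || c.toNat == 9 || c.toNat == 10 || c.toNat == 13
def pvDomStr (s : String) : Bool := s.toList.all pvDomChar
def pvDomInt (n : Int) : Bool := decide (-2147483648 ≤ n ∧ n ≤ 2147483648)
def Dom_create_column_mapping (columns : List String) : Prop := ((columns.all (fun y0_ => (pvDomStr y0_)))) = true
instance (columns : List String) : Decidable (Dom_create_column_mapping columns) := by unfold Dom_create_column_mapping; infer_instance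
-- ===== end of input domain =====

-- B replaces A's interleaved count-and-emit loop by an index-then-assign decomposition
-- (group by cleaned name, number each group, emit in original order); objective: alternative.

-- ===== PORT A =====
-- shared helper (identical in A and B)
def clean_column_name (col_name : String) : String :=
  let prefixes_to_remove := ["IQ_", "D_VALUE_BBG_", "D_APY_"]
  match prefixes_to_remove.foldl
      (fun acc p =>
        match acc with
        | some r => some r
        | none =>
          if PySem.Str.startswith col_name p then
            some (PySem.Str.slice col_name (some (PySem.Str.len p)) none)
          else none) none with
  | some r => r
  | none => col_name

def create_column_mapping (columns : List String) : List (String × String) :=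
  let st := columns.foldl
    (fun (st : PySem.Dict String String × PySem.Dict String Int) col =>
      let mapping := st.1
      let counts := st.2
      let cleaned := clean_column_name col
      match counts.get? cleaned with
      | some n =>
        (mapping.insert col (cleaned ++ "_" ++ PySem.Int.toStr (n + 1)),
         counts.insert cleaned (n + 1))
      | none =>
        (mapping.insert col cleaned, counts.insert cleaned 1))
    (PySem.Dict.empty, PySem.Dict.empty)
  st.1.items

-- ===== PORT B =====
def create_column_mapping_alt (columns : List String) : List (String × String) :=
  let groups : PySem.Dict String (List String) :=
    columns.foldl
      (fun g col => g.modify (clean_column_name col) [] (fun l => l ++ [col]))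
      PySem.Dict.empty
  let value : PySem.Dict String String :=
    groups.items.foldl
      (fun v p =>
        (PySem.List.enumerate p.2 1).foldl
          (fun v q =>
            v.insert q.2 (if q.1 == 1 then p.1 else p.1 ++ "_" ++ PySem.Int.toStr q.1))
          v)
      PySem.Dict.empty
  (columns.foldl (fun d col => d.insert col (value.getD col "")) PySem.Dict.empty).items

-- ===== PRECONDITION & SPEC =====
def Spec_create_column_mapping (columns : List String) (out : List (String × String)) : Prop := out = create_column_mapping_alt columns
instance (columns : List String) (out : List (String × String)) : Decidable (Spec_create_column_mapping columns out) := by unfold Spec_create_column_mapping; infer_instance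

-- ===== CLAIM (what is proved, stated in full; the proofs are below) =====
def Claim_equal_create_column_mapping : Prop := ∀ (columns : List String), Dom_create_column_mapping columns → Spec_create_column_mapping columns (create_column_mapping columns)

-- ===== LEMMAS AND PROOFS =====

-- the display name both programs attach to the k-th (1-based) occurrence of a cleaned name c
def pvVal (c : String) (k : Nat) : String :=
  if k = 1 then c else c ++ "_" ++ PySem.Int.toStr (k : Int)

-- ghost reformulation of A's mapping loop: the counter dict replaced by a counting function
def pvBump (f : String → Nat) (c : String) : String → Nat :=
  fun c' => if c' = c then f c' + 1 else f c'

def pvFoldV : List String → (String → Nat) → PySem.Dict String String → PySem.Dict String String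
  | [], _, m => m
  | x :: t, cnt, m =>
    pvFoldV t (pvBump cnt (clean_column_name x))
      (m.insert x (pvVal (clean_column_name x) (cnt (clean_column_name x) + 1)))

-- the group of c = columns whose cleaned name is c
def pvGrp (columns : List String) (c : String) : List String :=
  columns.filter (fun x => clean_column_name x == c)

-- 1-based position of the LAST occurrence of k (0 if absent), via the reversed list
def pvLastPosAux : List String → String → Nat
  | [], _ => 0
  | x :: r, k => if x = k then r.length + 1 else pvLastPosAux r k

def pvLastPos (l : List String) (k : String) : Nat := pvLastPosAux l.reverse k

-- number of columns cleaning to (clean_column_name k) up to and including k's last occurrence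
def pvKcAux : List String → String → Nat
  | [], _ => 0
  | x :: r, k =>
    if x = k then ((r.map clean_column_name).count (clean_column_name k)) + 1
    else pvKcAux r k

def pvKc (columns : List String) (k : String) : Nat := pvKcAux columns.reverse k

lemma pvA_eq_foldV (cols : List String) (cnt : String → Nat) (m : PySem.Dict String String)
    (d : PySem.Dict String Int)
    (hd : ∀ c, d.get? c = if cnt c = 0 then none else some (cnt c : Int)) :
    (cols.foldl
      (fun (st : PySem.Dict String String × PySem.Dict String Int) col =>
        let mapping := st.1
        let counts := st.2
        let cleaned := clean_column_name col
        match counts.get? cleaned with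
        | some n =>
          (mapping.insert col (cleaned ++ "_" ++ PySem.Int.toStr (n + 1)),
           counts.insert cleaned (n + 1))
        | none =>
          (mapping.insert col cleaned, counts.insert cleaned 1))
      (m, d)).1 = pvFoldV cols cnt m := by
  induction cols generalizing cnt m d with
  | nil => simp [pvFoldV]
  | cons x t ih =>
    simp only [List.foldl_cons]
    by_cases h0 : cnt (clean_column_name x) = 0
    · simp only [hd (clean_column_name x), h0, if_true]
      rw [show pvFoldV (x :: t) cnt m
            = pvFoldV t (pvBump cnt (clean_column_name x))
                (m.insert x (pvVal (clean_column_name x) (cnt (clean_column_name x) + 1))) from rfl]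
      have hv : pvVal (clean_column_name x) (cnt (clean_column_name x) + 1) = clean_column_name x := by
        simp [pvVal, h0]
      rw [hv]
      refine ih _ _ _ ?_
      intro c
      rw [PySem.Dict.get?_insert]
      by_cases hc : c = clean_column_name x
      · subst hc
        simp [pvBump, h0]
      · rw [if_neg hc, hd c]
        simp [pvBump, hc]
    · simp only [hd (clean_column_name x), h0, if_false]
      rw [show pvFoldV (x :: t) cnt m
            = pvFoldV t (pvBump cnt (clean_column_name x))
                (m.insert x (pvVal (clean_column_name x) (cnt (clean_column_name x) + 1))) from rfl]
      have hcast : ((cnt (clean_column_name x) + 1 : Nat) : Int)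
          = (cnt (clean_column_name x) : Int) + 1 := by push_cast; ring
      have hv : pvVal (clean_column_name x) (cnt (clean_column_name x) + 1)
          = clean_column_name x ++ "_" ++ PySem.Int.toStr ((cnt (clean_column_name x) : Int) + 1) := by
        rw [pvVal, if_neg (by omega), hcast]
      rw [hv]
      refine ih _ _ _ ?_
      intro c
      rw [PySem.Dict.get?_insert]
      by_cases hc : c = clean_column_name x
      · subst hc
        simp [pvBump, hcast]
      · rw [if_neg hc, hd c]
        simp [pvBump, hc]

lemma pvFoldV_append (u : List String) (x : String) (cnt : String → Nat) (m : PySem.Dict String String) :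
    pvFoldV (u ++ [x]) cnt m
      = (pvFoldV u cnt m).insert x
          (pvVal (clean_column_name x)
            (cnt (clean_column_name x) + (u.map clean_column_name).count (clean_column_name x) + 1)) := by
  induction u generalizing cnt m with
  | nil => simp [pvFoldV]
  | cons y u ih =>
    rw [List.cons_append]
    rw [show pvFoldV (y :: (u ++ [x])) cnt m
          = pvFoldV (u ++ [x]) (pvBump cnt (clean_column_name y))
              (m.insert y (pvVal (clean_column_name y) (cnt (clean_column_name y) + 1))) from rfl]
    rw [ih]
    rw [show pvFoldV (y :: u) cnt m
          = pvFoldV u (pvBump cnt (clean_column_name y))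
              (m.insert y (pvVal (clean_column_name y) (cnt (clean_column_name y) + 1))) from rfl]
    congr 2
    by_cases hc : clean_column_name x = clean_column_name y
    · simp [pvBump, hc]
      omega
    · have hb : (clean_column_name y == clean_column_name x) = false := by
        simp [Ne.symm hc]
      simp [pvBump, hc, List.count_cons, hb]

lemma pvKeys_insert_add (d : PySem.Dict String String) (k : String) (v : String) :
    (d.insert k v).keys = PySem.Set.add d.keys k := by
  by_cases h : d.contains k = true
  · rw [PySem.Dict.keys_insert_of_contains d v h]
    have hm : k ∈ d.keys := (PySem.Dict.contains_iff_mem_keys d k).1 h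
    simp [PySem.Set.add, PySem.Set.contains, hm]
  · have hf : d.contains k = false := by simpa using h
    rw [PySem.Dict.keys_insert_of_not_contains d v hf]
    have hm : k ∉ d.keys := fun hm => h ((PySem.Dict.contains_iff_mem_keys d k).2 hm)
    simp [PySem.Set.add, PySem.Set.contains, hm]

lemma pvFoldV_keys (cols : List String) (cnt : String → Nat) (m : PySem.Dict String String) :
    (pvFoldV cols cnt m).keys = PySem.Set.update m.keys cols := by
  induction cols generalizing cnt m with
  | nil => simp [pvFoldV, PySem.Set.update]
  | cons x t ih =>
    rw [show (pvFoldV (x :: t) cnt m)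
          = pvFoldV t (pvBump cnt (clean_column_name x))
              (m.insert x (pvVal (clean_column_name x) (cnt (clean_column_name x) + 1))) from rfl]
    rw [ih, pvKeys_insert_add]
    simp [PySem.Set.update]

lemma pvFoldV_get?_mem (cols : List String) (cnt : String → Nat) (m : PySem.Dict String String)
    (k : String) (hk : k ∈ cols) :
    (pvFoldV cols cnt m).get? k
      = some (pvVal (clean_column_name k) (cnt (clean_column_name k) + pvKc cols k)) := by
  induction cols using List.reverseRecOn with
  | nil => cases hk
  | append_singleton u x ih =>
    rw [pvFoldV_append, PySem.Dict.get?_insert]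
    by_cases hx : k = x
    · subst hx
      rw [if_pos rfl]
      have hkc : pvKc (u ++ [k]) k = (u.map clean_column_name).count (clean_column_name k) + 1 := by
        simp [pvKc, List.reverse_append, pvKcAux]
      rw [hkc]
      congr 2
    · rw [if_neg hx]
      have hku : k ∈ u := by
        rcases List.mem_append.1 hk with h | h
        · exact h
        · exact absurd (List.mem_singleton.1 h) hx
      rw [ih hku]
      have hkc : pvKc (u ++ [x]) k = pvKc u k := by
        simp [pvKc, List.reverse_append, pvKcAux, Ne.symm hx]
      rw [hkc]

-- B's final loop: lookup after a fold of inserts with a value function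
lemma pvFoldW_get?_mem (cols : List String) (f : String → String) (d0 : PySem.Dict String String)
    (k : String) (hk : k ∈ cols) :
    (cols.foldl (fun d col => d.insert col (f col)) d0).get? k = some (f k) := by
  induction cols using List.reverseRecOn generalizing d0 with
  | nil => cases hk
  | append_singleton u x ih =>
    rw [List.foldl_append]
    simp only [List.foldl_cons, List.foldl_nil]
    rw [PySem.Dict.get?_insert]
    by_cases hx : k = x
    · subst hx
      rw [if_pos rfl]
    · rw [if_neg hx]
      have hku : k ∈ u := by
        rcases List.mem_append.1 hk with h | h
        · exact h
        · exact absurd (List.mem_singleton.1 h) hx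
      exact ih d0 hku

-- groups characterization
lemma pvGroups_getD (columns : List String) (c : String) :
    (columns.foldl
      (fun g col => g.modify (clean_column_name col) [] (fun l => l ++ [col]))
      (PySem.Dict.empty : PySem.Dict String (List String))).getD c []
      = pvGrp columns c := by
  have hmap : columns.foldl
      (fun g col => g.modify (clean_column_name col) [] (fun l => l ++ [col]))
      (PySem.Dict.empty : PySem.Dict String (List String))
    = (columns.map (fun col => (clean_column_name col, col))).foldl
        (fun g p => g.modify p.1 [] (fun l => l ++ [p.2]))
        (PySem.Dict.empty : PySem.Dict String (List String)) := by
    rw [List.foldl_map]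
  rw [hmap, PySem.Dict.getD_foldl_modify_append]
  simp [pvGrp, List.filter_map, Function.comp_def, PySem.Dict.getD_empty]

lemma pvGroups_items (columns : List String) :
    (columns.foldl
      (fun g col => g.modify (clean_column_name col) [] (fun l => l ++ [col]))
      (PySem.Dict.empty : PySem.Dict String (List String))).items
      = (PySem.Set.ofList (columns.map clean_column_name)).map (fun c => (c, pvGrp columns c)) := by
  have hkeys : (columns.foldl
      (fun g col => g.modify (clean_column_name col) [] (fun l => l ++ [col]))
      (PySem.Dict.empty : PySem.Dict String (List String))).keys
      = PySem.Set.ofList (columns.map clean_column_name) := by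
    rw [PySem.Dict.keys_foldl_modify_key columns clean_column_name []
      (fun _ x => fun l => l ++ [x]) PySem.Dict.empty]
    simp [PySem.Set.update, PySem.Set.ofList, PySem.Set.empty]
  rw [PySem.Dict.items_eq_map_keys _ (by rw [hkeys]; exact PySem.Set.nodup_ofList _) []]
  rw [hkeys]
  apply List.map_congr_left
  intro c _
  rw [pvGroups_getD]

-- inner numbering fold: lookup of an absent key is unchanged
lemma pvInner_get?_not_mem (l : List String) (c : String) (s : Int)
    (v0 : PySem.Dict String String) (k : String) (hk : k ∉ l) :
    ((PySem.List.enumerate l s).foldl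
      (fun v q => v.insert q.2 (if q.1 == 1 then c else c ++ "_" ++ PySem.Int.toStr q.1)) v0).get? k
      = v0.get? k := by
  induction l generalizing s v0 with
  | nil => simp [PySem.List.enumerate_nil]
  | cons y l ih =>
    rw [PySem.List.enumerate_cons]
    simp only [List.foldl_cons]
    have h1 : k ∉ l := fun h => hk (List.mem_cons_of_mem _ h)
    have h2 : k ≠ y := by
      intro h
      exact hk (by simp [h])
    rw [ih (s + 1) _ h1, PySem.Dict.get?_insert, if_neg h2]

-- cast bridge between B's Int-indexed conditional and pvVal
lemma pvValCast (c : String) (n : Nat) :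
    (if ((n : Int) == 1) then c else c ++ "_" ++ PySem.Int.toStr (n : Int)) = pvVal c n := by
  by_cases h : n = 1
  · simp [h, pvVal]
  · have hb : (((n : Int)) == 1) = false := by
      simp
      omega
    have hv : pvVal c n = c ++ "_" ++ PySem.Int.toStr (n : Int) := by
      rw [pvVal, if_neg h]
    simp [hb, hv]

-- inner numbering fold: a present key gets the value of its last occurrence's 1-based position
lemma pvInner_get?_mem (l : List String) (c : String)
    (v0 : PySem.Dict String String) (k : String) (hk : k ∈ l) :
    ((PySem.List.enumerate l 1).foldl
      (fun v q => v.insert q.2 (if q.1 == 1 then c else c ++ "_" ++ PySem.Int.toStr q.1)) v0).get? k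
      = some (pvVal c (pvLastPos l k)) := by
  induction l using List.reverseRecOn with
  | nil => cases hk
  | append_singleton u x ih =>
    rw [PySem.List.enumerate_append, List.foldl_append]
    rw [PySem.List.enumerate_cons, PySem.List.enumerate_nil]
    simp only [List.foldl_cons, List.foldl_nil]
    rw [PySem.Dict.get?_insert]
    by_cases hx : k = x
    · subst hx
      rw [if_pos rfl]
      have hlp : pvLastPos (u ++ [k]) k = u.length + 1 := by
        simp [pvLastPos, List.reverse_append, pvLastPosAux]
      have hcast : (1 + (u.length : Int)) = ((u.length + 1 : Nat) : Int) := by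
        push_cast
        ring
      rw [hlp, hcast, pvValCast]
    · rw [if_neg hx]
      have hku : k ∈ u := by
        rcases List.mem_append.1 hk with h | h
        · exact h
        · exact absurd (List.mem_singleton.1 h) hx
      rw [ih hku]
      have hlp : pvLastPos (u ++ [x]) k = pvLastPos u k := by
        simp [pvLastPos, List.reverse_append, pvLastPosAux, Ne.symm hx]
      rw [hlp]

-- outer fold over groups whose cleaned name differs from k's leaves the lookup of k unchanged
lemma pvOuter_skip (columns : List String) (cs : List String) (k : String)
    (h : ∀ c ∈ cs, c ≠ clean_column_name k) (v0 : PySem.Dict String String) :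
    ((cs.map (fun c => (c, pvGrp columns c))).foldl
      (fun v p =>
        (PySem.List.enumerate p.2 1).foldl
          (fun v q =>
            v.insert q.2 (if q.1 == 1 then p.1 else p.1 ++ "_" ++ PySem.Int.toStr q.1)) v)
      v0).get? k = v0.get? k := by
  induction cs generalizing v0 with
  | nil => simp
  | cons c cs ih =>
    simp only [List.map_cons, List.foldl_cons]
    rw [ih (fun c' hc' => h c' (List.mem_cons_of_mem _ hc'))]
    apply pvInner_get?_not_mem
    intro hkg
    have hcl : (clean_column_name k == c) = true := (List.mem_filter.1 hkg).2
    have hck : clean_column_name k = c := by simpa using hcl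
    exact h c (by simp) hck.symm

-- outer fold over a nodup list of cleaned names containing k's: k gets its group value
lemma pvOuter_main (columns : List String) (cs : List String) (k : String)
    (hnd : cs.Nodup) (hc : clean_column_name k ∈ cs)
    (hkg : k ∈ pvGrp columns (clean_column_name k)) (v0 : PySem.Dict String String) :
    ((cs.map (fun c => (c, pvGrp columns c))).foldl
      (fun v p =>
        (PySem.List.enumerate p.2 1).foldl
          (fun v q =>
            v.insert q.2 (if q.1 == 1 then p.1 else p.1 ++ "_" ++ PySem.Int.toStr q.1)) v)
      v0).get? k
      = some (pvVal (clean_column_name k) (pvLastPos (pvGrp columns (clean_column_name k)) k)) := by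
  induction cs generalizing v0 with
  | nil => cases hc
  | cons c cs ih =>
    simp only [List.map_cons, List.foldl_cons]
    by_cases hcc : c = clean_column_name k
    · subst hcc
      rw [pvOuter_skip columns cs k
        (fun c' hc' hh => (List.nodup_cons.1 hnd).1 (hh ▸ hc'))]
      exact pvInner_get?_mem _ _ _ _ hkg
    · have hc' : clean_column_name k ∈ cs := by
        rcases List.mem_cons.1 hc with h | h
        · exact absurd h.symm hcc
        · exact h
      exact ih (List.nodup_cons.1 hnd).2 hc' _

-- the value dict of B
lemma pvValue_get? (columns : List String) (k : String) (hk : k ∈ columns) :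
    (((PySem.Set.ofList (columns.map clean_column_name)).map (fun c => (c, pvGrp columns c))).foldl
      (fun v p =>
        (PySem.List.enumerate p.2 1).foldl
          (fun v q =>
            v.insert q.2 (if q.1 == 1 then p.1 else p.1 ++ "_" ++ PySem.Int.toStr q.1)) v)
      PySem.Dict.empty).get? k
      = some (pvVal (clean_column_name k) (pvLastPos (pvGrp columns (clean_column_name k)) k)) := by
  apply pvOuter_main
  · exact PySem.Set.nodup_ofList _
  · exact (PySem.Set.mem_ofList _ _).2 (List.mem_map_of_mem hk)
  · exact List.mem_filter.2 ⟨hk, by simp⟩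

-- crux: the last position of k inside its group equals the prefix count up to k's last occurrence
lemma pvLastPos_grp_eq_kc (columns : List String) (k : String) (hk : k ∈ columns) :
    pvLastPos (pvGrp columns (clean_column_name k)) k = pvKc columns k := by
  induction columns using List.reverseRecOn with
  | nil => cases hk
  | append_singleton u x ih =>
    by_cases hx : k = x
    · subst hx
      have hg : pvGrp (u ++ [k]) (clean_column_name k)
          = pvGrp u (clean_column_name k) ++ [k] := by
        simp [pvGrp, List.filter_append]
      have hlp : pvLastPos (pvGrp u (clean_column_name k) ++ [k]) k
          = (pvGrp u (clean_column_name k)).length + 1 := by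
        simp [pvLastPos, List.reverse_append, pvLastPosAux]
      have hkc : pvKc (u ++ [k]) k
          = ((u.map clean_column_name).count (clean_column_name k)) + 1 := by
        simp [pvKc, List.reverse_append, pvKcAux]
      rw [hg, hlp, hkc]
      congr 1
      simp [pvGrp, ← List.countP_eq_length_filter, List.count, List.countP_map, Function.comp_def]
    · have hku : k ∈ u := by
        rcases List.mem_append.1 hk with h | h
        · exact h
        · exact absurd (List.mem_singleton.1 h) hx
      have hkc : pvKc (u ++ [x]) k = pvKc u k := by
        simp [pvKc, List.reverse_append, pvKcAux, Ne.symm hx]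
      rw [hkc, ← ih hku]
      by_cases hxc : (clean_column_name x == clean_column_name k) = true
      · have hg : pvGrp (u ++ [x]) (clean_column_name k)
            = pvGrp u (clean_column_name k) ++ [x] := by
          simp [pvGrp, List.filter_append, hxc]
        rw [hg]
        simp [pvLastPos, List.reverse_append, pvLastPosAux, Ne.symm hx]
      · have hg : pvGrp (u ++ [x]) (clean_column_name k)
            = pvGrp u (clean_column_name k) := by
          simp [pvGrp, List.filter_append, hxc]
        rw [hg]

-- B's value dict, in the groups-rewritten form (proof abbreviation)
def pvValueDict (columns : List String) : PySem.Dict String String :=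
  ((PySem.Set.ofList (columns.map clean_column_name)).map (fun c => (c, pvGrp columns c))).foldl
    (fun v p =>
      (PySem.List.enumerate p.2 1).foldl
        (fun v q =>
          v.insert q.2 (if q.1 == 1 then p.1 else p.1 ++ "_" ++ PySem.Int.toStr q.1)) v)
    PySem.Dict.empty

lemma pvFinal (columns : List String) (V : PySem.Dict String String)
    (hV : ∀ k ∈ columns, V.get? k = some (pvVal (clean_column_name k) (pvKc columns k))) :
    (pvFoldV columns (fun _ => 0) PySem.Dict.empty).items
      = (columns.foldl (fun d col => d.insert col (V.getD col "")) PySem.Dict.empty).items := by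
  have hupd : PySem.Set.update ([] : List String) columns = PySem.Set.ofList columns := by
    simp [PySem.Set.update, PySem.Set.ofList, PySem.Set.empty]
  have hkA : (pvFoldV columns (fun _ => 0) (PySem.Dict.empty : PySem.Dict String String)).keys
      = PySem.Set.ofList columns := by
    rw [pvFoldV_keys, PySem.Dict.keys_empty, hupd]
  have hkB : (columns.foldl (fun d col => d.insert col (V.getD col ""))
      (PySem.Dict.empty : PySem.Dict String String)).keys = PySem.Set.ofList columns := by
    rw [PySem.Dict.keys_foldl_insert columns (fun _ col => V.getD col "") PySem.Dict.empty]
    rw [PySem.Dict.keys_empty, hupd]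
  rw [PySem.Dict.items_eq_map_keys _ (by rw [hkA]; exact PySem.Set.nodup_ofList _) ""]
  rw [PySem.Dict.items_eq_map_keys _ (by rw [hkB]; exact PySem.Set.nodup_ofList _) ""]
  rw [hkA, hkB]
  apply List.map_congr_left
  intro k hk
  have hkc : k ∈ columns := (PySem.Set.mem_ofList _ _).1 hk
  have h1 : (pvFoldV columns (fun _ => 0) PySem.Dict.empty).get? k
      = some (pvVal (clean_column_name k) (pvKc columns k)) := by
    rw [pvFoldV_get?_mem _ _ _ _ hkc, Nat.zero_add]
  have h2 := pvFoldW_get?_mem columns (fun col => V.getD col "") PySem.Dict.empty k hkc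
  rw [PySem.Dict.getD_of_get?_eq_some _ "" h1, PySem.Dict.getD_of_get?_eq_some _ "" h2]
  show (k, pvVal (clean_column_name k) (pvKc columns k)) = (k, V.getD k "")
  rw [PySem.Dict.getD_of_get?_eq_some _ "" (hV k hkc)]

-- ===== VERDICT (by name: the statement is the Claim_ definition above) =====
theorem create_column_mapping_spec : Claim_equal_create_column_mapping := by
  intro columns _
  show create_column_mapping columns = create_column_mapping_alt columns
  have hA : create_column_mapping columns
      = (pvFoldV columns (fun _ => 0) PySem.Dict.empty).items := by
    unfold create_column_mapping
    exact congrArg PySem.Dict.items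
      (pvA_eq_foldV columns (fun _ => 0) _ _ (fun c => by simp [PySem.Dict.get?_empty]))
  have hB : create_column_mapping_alt columns
      = (columns.foldl (fun d col => d.insert col ((pvValueDict columns).getD col ""))
          PySem.Dict.empty).items := by
    unfold create_column_mapping_alt pvValueDict
    simp only [pvGroups_items]
  rw [hA, hB]
  apply pvFinal
  intro k hk
  have hval := pvValue_get? columns k hk
  rw [pvLastPos_grp_eq_kc columns k hk] at hval
  exact hval
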